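-- pv_equiv track=rewrite | github.com/Holo-xy/Pyrowser | app.py | lex
-- ===== SOURCE A (Python) =====
-- def lex(body):
--     in_tag = False
--     text = ""
--     i = 0
--     while i < len(body):
--         c = body[i]
--         if c == "<":
--             in_tag = True
--         elif c == ">":
--             in_tag = False
--         elif c == '&':
--             if body[i:i + 4] == '&lt;':
--                 text += '<'
--                 i += 3
--             elif body[i:i + 4] == '&gt;':
--                 text += '>'
--                 i += 3
--         elif not in_tag:
--             text += c
--         i += 1
--     return text
-- ===== SOURCE B (Python) =====
-- def lex(body):
--     # Chunked scanner: jump over runs of ordinary characters and append them as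
--     # whole slices, handling '<', '>' and '&'-entities at the chunk boundaries.
--     parts = []
--     in_tag = False
--     i, n = 0, len(body)
--     while i < n:
--         c = body[i]
--         if c == '<':
--             in_tag = True
--             i += 1
--         elif c == '>':
--             in_tag = False
--             i += 1
--         elif c == '&':
--             if body.startswith('&lt;', i):
--                 parts.append('<')
--                 i += 4
--             elif body.startswith('&gt;', i):
--                 parts.append('>')
--                 i += 4
--             else:
--                 i += 1
--         else:
--             j = i
--             while j < n and body[j] not in '<>&':
--                 j += 1
--             if not in_tag:
--                 parts.append(body[i:j])
--             i = j
--     return ''.join(parts)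
-- ===== Notes on version B (the rewrite author's own statement) =====
-- stated objective: faster
-- what changed: Replaces A's per-character index loop that grows the result by repeated string concatenation with a chunked scanner: maximal runs of ordinary characters are appended as whole slices to a parts list that is joined once at the end, with startswith used for entity lookahead.
import Mathlib
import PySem

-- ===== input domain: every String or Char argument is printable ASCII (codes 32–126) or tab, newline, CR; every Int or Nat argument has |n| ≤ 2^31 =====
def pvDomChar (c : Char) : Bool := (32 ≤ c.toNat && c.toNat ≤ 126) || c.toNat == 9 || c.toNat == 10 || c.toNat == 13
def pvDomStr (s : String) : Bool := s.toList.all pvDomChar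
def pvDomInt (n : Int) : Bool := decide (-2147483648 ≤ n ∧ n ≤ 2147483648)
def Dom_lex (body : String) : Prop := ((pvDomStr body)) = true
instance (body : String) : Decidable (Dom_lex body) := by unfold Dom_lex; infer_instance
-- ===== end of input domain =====

-- B rewrites A's per-character state loop as a chunked scanner (runs of ordinary
-- characters are appended as whole slices and joined at the end); same exact output, avoiding quadratic string concatenation.

-- ===== PORT A =====
-- A's while-loop over index i, transliterated as recursion over the remaining
-- suffix of the character list; `text += c` is the accumulator `acc`, the slice
-- test body[i:i+4] == '&lt;' is `rest.take 3 = "lt;"` after the '&' head,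
-- and `i += 3; i += 1` is `rest.drop 3`.
def lexLoop (in_tag : Bool) (acc : List Char) : List Char → List Char
  | [] => acc
  | c :: rest =>
    if c = '<' then lexLoop true acc rest
    else if c = '>' then lexLoop false acc rest
    else if c = '&' then
      if rest.take 3 = ['l', 't', ';'] then lexLoop in_tag (acc ++ ['<']) (rest.drop 3)
      else if rest.take 3 = ['g', 't', ';'] then lexLoop in_tag (acc ++ ['>']) (rest.drop 3)
      else lexLoop in_tag acc rest
    else if !in_tag then lexLoop in_tag (acc ++ [c]) rest
    else lexLoop in_tag acc rest
  termination_by l => l.length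
  decreasing_by
    · simp
    · simp
    · simp [List.length_drop]
    · simp [List.length_drop]
    · simp
    · simp
    · simp

def lex (body : String) : String := String.ofList (lexLoop false [] body.toList)

-- ===== PORT B =====
-- whether a character is one of the special characters '<>&' (Source B's `body[j] not in '<>&'` negated)
def pvSpecial (c : Char) : Bool := c = '<' || c = '>' || c = '&'

-- B's while-loop: one step per special character or per CHUNK (maximal run of
-- ordinary characters, Source B's inner `while j < n and body[j] not in '<>&'`);
-- `parts` is the list of appended slices, joined at the end.
def lexAltLoop (in_tag : Bool) (parts : List (List Char)) : List Char → List (List Char)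
  | [] => parts
  | c :: rest =>
    if c = '<' then lexAltLoop true parts rest
    else if c = '>' then lexAltLoop false parts rest
    else if c = '&' then
      -- body.startswith('&lt;', i)
      if (c :: rest).take 4 = ['&', 'l', 't', ';'] then
        lexAltLoop in_tag (parts ++ [['<']]) (rest.drop 3)
      else if (c :: rest).take 4 = ['&', 'g', 't', ';'] then
        lexAltLoop in_tag (parts ++ [['>']]) (rest.drop 3)
      else lexAltLoop in_tag parts rest
    else
      let chunk := (c :: rest).takeWhile (fun x => !pvSpecial x)
      let rest' := (c :: rest).dropWhile (fun x => !pvSpecial x)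
      lexAltLoop in_tag (if !in_tag then parts ++ [chunk] else parts) rest'
  termination_by l => l.length
  decreasing_by
    · simp
    · simp
    · simp [List.length_drop]
    · simp [List.length_drop]
    · simp
    · have h := List.length_dropWhile_le (fun x => !pvSpecial x) rest
      simp_all [pvSpecial]

def lex_alt (body : String) : String := String.ofList ((lexAltLoop false [] body.toList).flatten)

-- ===== PRECONDITION & SPEC =====
def Spec_lex (body : String) (out : String) : Prop := out = lex_alt body
instance (body : String) (out : String) : Decidable (Spec_lex body out) := by unfold Spec_lex; infer_instance

-- ===== CLAIM (what is proved, stated in full; the proofs are below) =====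
def Claim_equal_lex : Prop := ∀ (body : String), Dom_lex body → Spec_lex body (lex body)

-- ===== LEMMAS AND PROOFS =====

-- unfolding lemmas for the two loops (one per branch)
lemma lexLoop_nil (t : Bool) (acc : List Char) : lexLoop t acc [] = acc := by
  rw [lexLoop]

lemma lexLoop_lt (t : Bool) (acc rest : List Char) :
    lexLoop t acc ('<' :: rest) = lexLoop true acc rest := by
  rw [lexLoop]; simp

lemma lexLoop_gt (t : Bool) (acc rest : List Char) :
    lexLoop t acc ('>' :: rest) = lexLoop false acc rest := by
  rw [lexLoop]; simp

lemma lexLoop_amp_lt (t : Bool) (acc rest : List Char) (h : rest.take 3 = ['l', 't', ';']) :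
    lexLoop t acc ('&' :: rest) = lexLoop t (acc ++ ['<']) (rest.drop 3) := by
  rw [lexLoop]; simp [h]

lemma lexLoop_amp_gt (t : Bool) (acc rest : List Char)
    (_h1 : ¬ rest.take 3 = ['l', 't', ';']) (h2 : rest.take 3 = ['g', 't', ';']) :
    lexLoop t acc ('&' :: rest) = lexLoop t (acc ++ ['>']) (rest.drop 3) := by
  rw [lexLoop]; simp [h2]

lemma lexLoop_amp_none (t : Bool) (acc rest : List Char)
    (h1 : ¬ rest.take 3 = ['l', 't', ';']) (h2 : ¬ rest.take 3 = ['g', 't', ';']) :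
    lexLoop t acc ('&' :: rest) = lexLoop t acc rest := by
  rw [lexLoop]; simp [h1, h2]

lemma lexLoop_other_false (acc rest : List Char) (c : Char) (h : pvSpecial c = false) :
    lexLoop false acc (c :: rest) = lexLoop false (acc ++ [c]) rest := by
  have h1 : ¬ c = '<' := by rintro rfl; simp [pvSpecial] at h
  have h2 : ¬ c = '>' := by rintro rfl; simp [pvSpecial] at h
  have h3 : ¬ c = '&' := by rintro rfl; simp [pvSpecial] at h
  rw [lexLoop]; simp [h1, h2, h3]

lemma lexLoop_other_true (acc rest : List Char) (c : Char) (h : pvSpecial c = false) :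
    lexLoop true acc (c :: rest) = lexLoop true acc rest := by
  have h1 : ¬ c = '<' := by rintro rfl; simp [pvSpecial] at h
  have h2 : ¬ c = '>' := by rintro rfl; simp [pvSpecial] at h
  have h3 : ¬ c = '&' := by rintro rfl; simp [pvSpecial] at h
  rw [lexLoop]; simp [h1, h2, h3]

lemma lexAltLoop_nil (t : Bool) (p : List (List Char)) : lexAltLoop t p [] = p := by
  rw [lexAltLoop]

lemma lexAltLoop_lt (t : Bool) (p : List (List Char)) (rest : List Char) :
    lexAltLoop t p ('<' :: rest) = lexAltLoop true p rest := by
  rw [lexAltLoop]; simp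

lemma lexAltLoop_gt (t : Bool) (p : List (List Char)) (rest : List Char) :
    lexAltLoop t p ('>' :: rest) = lexAltLoop false p rest := by
  rw [lexAltLoop]; simp

lemma lexAltLoop_amp_lt (t : Bool) (p : List (List Char)) (rest : List Char)
    (h : rest.take 3 = ['l', 't', ';']) :
    lexAltLoop t p ('&' :: rest) = lexAltLoop t (p ++ [['<']]) (rest.drop 3) := by
  rw [lexAltLoop]; simp [List.take_succ_cons, h]

lemma lexAltLoop_amp_gt (t : Bool) (p : List (List Char)) (rest : List Char)
    (_h1 : ¬ rest.take 3 = ['l', 't', ';']) (h2 : rest.take 3 = ['g', 't', ';']) :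
    lexAltLoop t p ('&' :: rest) = lexAltLoop t (p ++ [['>']]) (rest.drop 3) := by
  rw [lexAltLoop]; simp [List.take_succ_cons, h2]

lemma lexAltLoop_amp_none (t : Bool) (p : List (List Char)) (rest : List Char)
    (h1 : ¬ rest.take 3 = ['l', 't', ';']) (h2 : ¬ rest.take 3 = ['g', 't', ';']) :
    lexAltLoop t p ('&' :: rest) = lexAltLoop t p rest := by
  rw [lexAltLoop]; simp [List.take_succ_cons, h1, h2]

lemma lexAltLoop_other (t : Bool) (p : List (List Char)) (rest : List Char) (c : Char)
    (h : pvSpecial c = false) :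
    lexAltLoop t p (c :: rest) =
      lexAltLoop t (if !t then p ++ [(c :: rest).takeWhile (fun x => !pvSpecial x)] else p)
        ((c :: rest).dropWhile (fun x => !pvSpecial x)) := by
  have h1 : ¬ c = '<' := by rintro rfl; simp [pvSpecial] at h
  have h2 : ¬ c = '>' := by rintro rfl; simp [pvSpecial] at h
  have h3 : ¬ c = '&' := by rintro rfl; simp [pvSpecial] at h
  rw [lexAltLoop]; simp [h1, h2, h3]

-- A's per-character loop eats a whole chunk of ordinary characters exactly as B does.
lemma lexLoop_chunk (l : List Char) (t : Bool) (acc : List Char) :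
    lexLoop t acc l =
      lexLoop t (acc ++ (if t then [] else l.takeWhile (fun x => !pvSpecial x)))
        (l.dropWhile (fun x => !pvSpecial x)) := by
  induction l generalizing acc with
  | nil => cases t <;> simp
  | cons c rest ih =>
    by_cases hs : pvSpecial c = true
    · rw [List.takeWhile_cons, List.dropWhile_cons]
      simp only [hs, Bool.not_true, if_neg (by simp : ¬ (false = true))]
      cases t <;> simp
    · have hb : pvSpecial c = false := by simpa using hs
      rw [List.takeWhile_cons, List.dropWhile_cons]
      simp only [hb, Bool.not_false, if_true]
      cases t with
      | false =>
        rw [lexLoop_other_false acc rest c hb, ih (acc ++ [c])]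
        simp
      | true =>
        rw [lexLoop_other_true acc rest c hb, ih acc]
        simp

lemma lexAlt_eq_lex (n : ℕ) : ∀ (l : List Char), l.length ≤ n →
    ∀ (t : Bool) (parts : List (List Char)),
      (lexAltLoop t parts l).flatten = lexLoop t parts.flatten l := by
  induction n with
  | zero =>
    intro l hl t parts
    have he : l = [] := by cases l <;> simp_all
    subst he; rw [lexAltLoop_nil, lexLoop_nil]
  | succ n ih =>
    intro l hl t parts
    cases l with
    | nil => rw [lexAltLoop_nil, lexLoop_nil]
    | cons c rest =>
      simp only [List.length_cons, Nat.succ_le_succ_iff] at hl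
      by_cases h1 : c = '<'
      · subst h1
        rw [lexAltLoop_lt, lexLoop_lt]
        exact ih rest hl true parts
      · by_cases h2 : c = '>'
        · subst h2
          rw [lexAltLoop_gt, lexLoop_gt]
          exact ih rest hl false parts
        · by_cases h3 : c = '&'
          · subst h3
            by_cases hlt : rest.take 3 = ['l', 't', ';']
            · rw [lexAltLoop_amp_lt t parts rest hlt, lexLoop_amp_lt t _ rest hlt]
              rw [ih (rest.drop 3) (by simp [List.length_drop]; omega) t (parts ++ [['<']])]
              simp
            · by_cases hgt : rest.take 3 = ['g', 't', ';']
              · rw [lexAltLoop_amp_gt t parts rest hlt hgt, lexLoop_amp_gt t _ rest hlt hgt]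
                rw [ih (rest.drop 3) (by simp [List.length_drop]; omega) t (parts ++ [['>']])]
                simp
              · rw [lexAltLoop_amp_none t parts rest hlt hgt, lexLoop_amp_none t _ rest hlt hgt]
                exact ih rest hl t parts
          · have hs : pvSpecial c = false := by simp [pvSpecial, h1, h2, h3]
            have hdw : (c :: rest).dropWhile (fun x => !pvSpecial x)
                = rest.dropWhile (fun x => !pvSpecial x) := by
              rw [List.dropWhile_cons]; simp [hs]
            have hdrop : ((c :: rest).dropWhile (fun x => !pvSpecial x)).length ≤ n := by
              rw [hdw]
              have := List.length_dropWhile_le (fun x => !pvSpecial x) rest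
              omega
            rw [lexAltLoop_other t parts rest c hs]
            rw [ih _ hdrop t _]
            rw [lexLoop_chunk (c :: rest) t parts.flatten]
            cases t <;> simp

-- ===== VERDICT (by name: the statement is the Claim_ definition above) =====
theorem lex_spec : Claim_equal_lex := by
  intro body _
  unfold Spec_lex lex lex_alt
  rw [lexAlt_eq_lex body.toList.length body.toList le_rfl false []]
  rfl
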